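-- pv_equiv track=rewrite | github.com/juandarr/advent-of-code | 2023/day16/day16-2.py | runBeam
-- ===== SOURCE A (Python) =====
-- def inLimits(m, i, j):
--     if i < 0 or i > len(m) - 1 or j < 0 or j > len(m[0]) - 1:
--         return False
--     return True
--
-- def changeDir(d, mirror):
--     tmp = []
--     if mirror == "\\":
--         tmp = (d[1], d[0])
--     elif mirror == "/":
--         tmp = (-1 * d[1], -1 * d[0])
--     return tuple(tmp)
--
-- def runBeam(m, start, dir, visited):
--     i = start[0]
--     j = start[1]
--     curDir = dir
--     while inLimits(m, i, j) and ((i, j), curDir) not in visited: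
--         visited.add(((i, j), curDir))
--         if m[i][j] != ".":
--             if m[i][j] in ["|", "-"]:
--                 if m[i][j] == "|" and curDir in [(0, 1), (0, -1)]:
--                     visited.union(runBeam(m, [i - 1, j], (-1, 0), visited))
--                     visited.union(runBeam(m, [i + 1, j], (1, 0), visited))
--                     break
--                 if m[i][j] == "-" and curDir in [(1, 0), (-1, 0)]:
--                     visited.union(runBeam(m, [i, j + 1], (0, 1), visited))
--                     visited.union(runBeam(m, [i, j - 1], (0, -1), visited))
--                     break
--             else:
--                 curDir = changeDir(curDir, m[i][j])
--         i += curDir[0]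
--         j += curDir[1]
--     return visited
-- ===== SOURCE B (Python) =====
-- def inLimits(m, i, j):
--     if i < 0 or i > len(m) - 1 or j < 0 or j > len(m[0]) - 1:
--         return False
--     return True
--
--
-- def changeDir(d, mirror):
--     tmp = []
--     if mirror == "\\":
--         tmp = (d[1], d[0])
--     elif mirror == "/":
--         tmp = (-1 * d[1], -1 * d[0])
--     return tuple(tmp)
--
--
-- def successors(m, state):
--     # the beam states one cell spawns, as a pure function of the state
--     (i, j), d = state
--     c = m[i][j]
--     if c == "|" and d in ((0, 1), (0, -1)):
--         return [((i - 1, j), (-1, 0)), ((i + 1, j), (1, 0))]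
--     if c == "-" and d in ((1, 0), (-1, 0)):
--         return [((i, j + 1), (0, 1)), ((i, j - 1), (0, -1))]
--     nd = d if c in ".|-" else changeDir(d, c)
--     return [((i + nd[0], j + nd[1]), nd)]
--
--
-- def runBeam(m, start, dir, visited):
--     # generic graph search: an explicit worklist of beam states and one
--     # successor function, no recursion; mutates and returns the same set.
--     stack = [((start[0], start[1]), dir)]
--     while stack:
--         state = stack.pop()
--         if inLimits(m, state[0][0], state[0][1]) and state not in visited:
--             visited.add(state)
--             for nxt in reversed(successors(m, state)):
--                 stack.append(nxt)
--     return visited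
-- ===== Notes on version B (the rewrite author's own statement) =====
-- stated objective: idiomatic
-- what changed: A's recursion-inside-a-while-loop (the walk loop recursing into itself at each splitter) is replaced by a generic graph search: a pure successors(m, state) function giving the beam states each cell spawns, driven by one non-recursive worklist loop that pops a state, adds it to the shared visited set and pushes its successors; it raises IndexError on exactly the same malformed cells as A (via the same changeDir helper) and returns the same set.
-- outside the precondition, e.g. on runBeam(['.a'], [0, 0], (0, -1), set()): A returns {((0, 0), (0, -1))}, B returns {((0, 0), (0, -1))}
import Mathlib
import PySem

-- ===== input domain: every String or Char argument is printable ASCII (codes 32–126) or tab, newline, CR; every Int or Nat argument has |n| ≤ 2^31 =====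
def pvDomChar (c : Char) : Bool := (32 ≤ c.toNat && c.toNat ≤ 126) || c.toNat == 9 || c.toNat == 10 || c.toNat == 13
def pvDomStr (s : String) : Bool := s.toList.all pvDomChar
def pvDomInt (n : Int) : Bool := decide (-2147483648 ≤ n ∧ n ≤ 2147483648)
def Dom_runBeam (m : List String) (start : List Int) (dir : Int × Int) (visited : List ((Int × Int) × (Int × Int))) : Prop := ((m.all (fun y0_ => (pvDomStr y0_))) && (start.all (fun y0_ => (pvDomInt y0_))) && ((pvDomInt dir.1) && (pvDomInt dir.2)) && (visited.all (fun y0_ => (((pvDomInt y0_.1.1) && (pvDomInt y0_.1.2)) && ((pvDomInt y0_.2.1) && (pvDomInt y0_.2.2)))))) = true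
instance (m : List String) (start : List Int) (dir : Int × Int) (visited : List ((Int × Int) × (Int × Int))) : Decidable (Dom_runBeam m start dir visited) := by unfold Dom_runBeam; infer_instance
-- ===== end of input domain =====

-- B replaces A's recursion-inside-a-while-loop by a generic worklist graph search (a pure
-- successor function per beam state plus one stack loop); objective: idiomatic, not faster.
-- Both A and B mutate the argument set `visited` in the same way (adding the same states);
-- the equivalence proved here is about the return value.

-- ===== PORT A =====
-- helper inLimits (shared by both Pythons verbatim)
def inLimits (m : List String) (i : Int) (j : Int) : Bool :=
  if i < 0 ∨ (m.length : Int) - 1 < i ∨ j < 0 ∨ PySem.Str.len (m.headD "") - 1 < j then false else true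
  -- Python short-circuits before evaluating len(m[0]) when m = [], so headD "" is exact

-- helper changeDir (shared).  For a char other than '\' or '/' the Python builds the empty
-- tuple and its caller then raises IndexError; such runs are outside Pre_ (default: keep d).
def changeDir (d : Int × Int) (mirror : Char) : Int × Int :=
  if mirror = '\\' then (d.2, d.1)
  else if mirror = '/' then (-d.2, -d.1)
  else d

-- m[i][j]; exact whenever inLimits holds and row i is at least as long as m[0] (Pre_);
-- on a shorter row Python raises IndexError — outside Pre_.
def cellAt (m : List String) (i : Int) (j : Int) : Char :=
  match PySem.List.pyGet? m i with
  | some row => (PySem.Str.pyGet? row j).getD '.'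
  | none => '.'

-- the finitely many beam directions reachable from an initial direction (closure of changeDir
-- plus the four unit directions spawned by splitters); used only to size the fuel
def dirsOf (dir : Int × Int) : List (Int × Int) :=
  [dir, (dir.2, dir.1), (-dir.2, -dir.1), (-dir.1, -dir.2), (1, 0), (-1, 0), (0, 1), (0, -1)]

-- all in-grid beam states with a reachable direction: every state either program ever adds
def allStates (m : List String) (dir : Int × Int) : List ((Int × Int) × (Int × Int)) :=
  (List.range m.length).flatMap (fun a =>
    (List.range (PySem.Str.len (m.headD "")).toNat).flatMap (fun b =>
      (dirsOf dir).map (fun d => (((a : Int), (b : Int)), d))))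

-- A's while-loop + recursion; fuel decreases once per loop iteration that adds a state.
-- Python terminates because each iteration adds a new state from allStates, so fuel
-- (allStates).length + 1 is never exhausted (this is what pv_goA_fuel below captures).
def goA (m : List String) : Nat → Int → Int → Int × Int → List ((Int × Int) × (Int × Int)) → List ((Int × Int) × (Int × Int))
  | 0, _, _, _, v => v
  | f + 1, i, j, d, v =>
    if (inLimits m i j && ! v.contains ((i, j), d)) = true then
      if cellAt m i j ≠ '.' then
        if cellAt m i j = '|' ∨ cellAt m i j = '-' then
          if cellAt m i j = '|' ∧ (d = (0, 1) ∨ d = (0, -1)) then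
            goA m f (i + 1) j (1, 0) (goA m f (i - 1) j (-1, 0) (PySem.Set.add v ((i, j), d)))
          else if cellAt m i j = '-' ∧ (d = (1, 0) ∨ d = (-1, 0)) then
            goA m f i (j - 1) (0, -1) (goA m f i (j + 1) (0, 1) (PySem.Set.add v ((i, j), d)))
          else
            goA m f (i + d.1) (j + d.2) d (PySem.Set.add v ((i, j), d))
        else
          goA m f (i + (changeDir d (cellAt m i j)).1) (j + (changeDir d (cellAt m i j)).2)
            (changeDir d (cellAt m i j)) (PySem.Set.add v ((i, j), d))
      else
        goA m f (i + d.1) (j + d.2) d (PySem.Set.add v ((i, j), d))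
    else v

def runBeam (m : List String) (start : List Int) (dir : Int × Int) (visited : List ((Int × Int) × (Int × Int))) : List ((Int × Int) × (Int × Int)) :=
  -- start[0] / start[1]; Pre_ guarantees both exist (Python raises IndexError otherwise)
  goA m ((allStates m dir).length + 1) ((PySem.List.pyGet? start 0).getD 0)
    ((PySem.List.pyGet? start 1).getD 0) dir visited

-- ===== PORT B =====
-- Source B's pure successor function: the beam states one cell spawns
def succsB (m : List String) (st : (Int × Int) × (Int × Int)) : List ((Int × Int) × (Int × Int)) :=
  let c := cellAt m st.1.1 st.1.2
  if c = '|' ∧ (st.2 = (0, 1) ∨ st.2 = (0, -1)) then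
    [((st.1.1 - 1, st.1.2), (-1, 0)), ((st.1.1 + 1, st.1.2), (1, 0))]
  else if c = '-' ∧ (st.2 = (1, 0) ∨ st.2 = (-1, 0)) then
    [((st.1.1, st.1.2 + 1), (0, 1)), ((st.1.1, st.1.2 - 1), (0, -1))]
  else
    let nd := if c = '.' ∨ c = '|' ∨ c = '-' then st.2 else changeDir st.2 c
    [((st.1.1 + nd.1, st.1.2 + nd.2), nd)]

-- Source B's worklist loop: the Lean list head is the top of the Python stack (the Python pushes
-- the successors reversed and pops from the end, i.e. new stack = succs ++ rest here).
-- Fuel decreases once per pop; Python terminates because pops are bounded by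
-- 1 + 2·(states added) ≤ 3·(allStates).length + 2.
def goB (m : List String) : Nat → List ((Int × Int) × (Int × Int)) → List ((Int × Int) × (Int × Int)) → List ((Int × Int) × (Int × Int))
  | _, [], v => v
  | 0, _ :: _, v => v
  | f + 1, s :: rest, v =>
    if (inLimits m s.1.1 s.1.2 && ! v.contains s) = true then
      goB m f (succsB m s ++ rest) (PySem.Set.add v s)
    else goB m f rest v

def runBeam_alt (m : List String) (start : List Int) (dir : Int × Int) (visited : List ((Int × Int) × (Int × Int))) : List ((Int × Int) × (Int × Int)) :=
  goB m (3 * (allStates m dir).length + 2)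
    [(((PySem.List.pyGet? start 0).getD 0, (PySem.List.pyGet? start 1).getD 0), dir)] visited

-- ===== PRECONDITION & SPEC =====
-- Pre_ restricts to the task's natural domain — rectangular grids over the five cell
-- characters . | - \ / with a start list of length ≥ 2 — except where the loop body never
-- runs (start out of the grid or its state already visited), which is admitted for any grid.
-- Outside it BOTH A and B raise IndexError whenever the beam reaches a ragged or foreign
-- cell (a reachability condition with no closed form), and on the remaining excluded inputs,
-- where the beam happens to avoid every bad cell, both return the same set — see the cites.
def Pre_runBeam (m : List String) (start : List Int) (dir : Int × Int) (visited : List ((Int × Int) × (Int × Int))) : Prop :=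
  2 ≤ start.length ∧
  ( (start.getD 0 0 < 0 ∨ (m.length : Int) ≤ start.getD 0 0 ∨ start.getD 1 0 < 0 ∨
      PySem.Str.len (m.headD "") ≤ start.getD 1 0)
    ∨ ((start.getD 0 0, start.getD 1 0), dir) ∈ visited
    ∨ (m.all (fun row => decide (PySem.Str.len (m.headD "") ≤ PySem.Str.len row) &&
        row.toList.all (fun c => ['.', '|', '-', '\\', '/'].contains c))) = true )
instance (m : List String) (start : List Int) (dir : Int × Int) (visited : List ((Int × Int) × (Int × Int))) : Decidable (Pre_runBeam m start dir visited) := by unfold Pre_runBeam; infer_instance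

def pvWitness_runBeam : List String × List Int × (Int × Int) × (List ((Int × Int) × (Int × Int))) :=
  ([".\\", "-."], [0, 0], (0, 1), [])

def Spec_runBeam (m : List String) (start : List Int) (dir : Int × Int) (visited : List ((Int × Int) × (Int × Int))) (out : List ((Int × Int) × (Int × Int))) : Prop := out = runBeam_alt m start dir visited
instance (m : List String) (start : List Int) (dir : Int × Int) (visited : List ((Int × Int) × (Int × Int))) (out : List ((Int × Int) × (Int × Int))) : Decidable (Spec_runBeam m start dir visited out) := by unfold Spec_runBeam; infer_instance

-- ===== CLAIM (what is proved, stated in full; the proofs are below) =====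
def Claim_equal_runBeam : Prop := ∀ (m : List String) (start : List Int) (dir : Int × Int) (visited : List ((Int × Int) × (Int × Int))), Dom_runBeam m start dir visited → Pre_runBeam m start dir visited → Spec_runBeam m start dir visited (runBeam m start dir visited)

-- ===== LEMMAS AND PROOFS =====

-- number of candidate states not yet visited: the joint termination measure
def pvMu (m : List String) (dir : Int × Int) (v : List ((Int × Int) × (Int × Int))) : Nat :=
  ((allStates m dir).filter (fun s => ! v.contains s)).length

-- running A's walker once per stack entry, left to right, always with ample fuel
def AFold (m : List String) (dir : Int × Int) : List ((Int × Int) × (Int × Int)) → List ((Int × Int) × (Int × Int)) → List ((Int × Int) × (Int × Int))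
  | [], v => v
  | b :: rest, v => AFold m dir rest (goA m ((allStates m dir).length + 1) b.1.1 b.1.2 b.2 v)


lemma pv_changeDir_mem (dir d : Int × Int) (c : Char) (h : d ∈ dirsOf dir) :
    changeDir d c ∈ dirsOf dir := by
  simp only [dirsOf, List.mem_cons, List.not_mem_nil, or_false] at h ⊢
  unfold changeDir
  rcases h with h | h | h | h | h | h | h | h <;> subst h <;> split_ifs <;> simp

lemma pv_mem_allStates {m : List String} {dir : Int × Int} {i j : Int} {d : Int × Int}
    (hL : inLimits m i j = true) (hd : d ∈ dirsOf dir) : ((i, j), d) ∈ allStates m dir := by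
  unfold inLimits at hL
  split_ifs at hL with h
  push Not at h
  obtain ⟨h1, h2, h3, h4⟩ := h
  unfold allStates
  simp only [List.mem_flatMap, List.mem_map]
  refine ⟨i, ?_, j, ?_, ⟨d, hd, rfl⟩⟩
  · simp only [List.pure_def, List.bind_eq_flatMap, List.mem_flatMap, List.mem_range,
      List.mem_singleton]
    exact ⟨i.toNat, by omega, by omega⟩
  · simp only [List.pure_def, List.bind_eq_flatMap, List.mem_flatMap, List.mem_range,
      List.mem_singleton]
    exact ⟨j.toNat, by omega, by omega⟩

lemma pv_add_append {v : List ((Int × Int) × (Int × Int))} {s : (Int × Int) × (Int × Int)}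
    (h : s ∉ v) : PySem.Set.add v s = v ++ [s] := by
  simp [PySem.Set.add, h]

lemma pv_mem_add {v : List ((Int × Int) × (Int × Int))} {s x : (Int × Int) × (Int × Int)}
    (h : x ∈ v) : x ∈ PySem.Set.add v s := by
  by_cases hs : s ∈ v
  · simpa [PySem.Set.add, List.contains_iff_mem, hs] using h
  · rw [pv_add_append hs]; exact List.mem_append_left _ h

lemma pv_goA_mono (m : List String) (f : Nat) :
    ∀ (i j : Int) (d : Int × Int) (v : List ((Int × Int) × (Int × Int)))
      (x : (Int × Int) × (Int × Int)), x ∈ v → x ∈ goA m f i j d v := by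
  induction f with
  | zero => intro i j d v x hx; simpa [goA] using hx
  | succ f ih =>
    intro i j d v x hx
    simp only [goA]
    split_ifs <;> try exact hx
    all_goals first
      | exact ih _ _ _ _ _ (ih _ _ _ _ _ (pv_mem_add hx))
      | exact ih _ _ _ _ _ (pv_mem_add hx)

lemma pv_not_contains_mono {v w : List ((Int × Int) × (Int × Int))}
    (hvw : ∀ x, x ∈ v → x ∈ w) (a : (Int × Int) × (Int × Int))
    (ha : (! w.contains a) = true) : (! v.contains a) = true := by
  simp only [Bool.not_eq_true', ← Bool.not_eq_true, List.contains_iff_mem] at ha ⊢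
  exact fun hm => ha (hvw a hm)

lemma pv_mu_le_of_subset {m : List String} {dir : Int × Int}
    {v w : List ((Int × Int) × (Int × Int))} (h : ∀ x, x ∈ v → x ∈ w) :
    pvMu m dir w ≤ pvMu m dir v := by
  exact List.Sublist.length_le (List.monotone_filter_right _ (pv_not_contains_mono h))

lemma pv_mu_le_len (m : List String) (dir : Int × Int) (v : List ((Int × Int) × (Int × Int))) :
    pvMu m dir v ≤ (allStates m dir).length := List.length_filter_le _ _

lemma pv_mu_lt_add {m : List String} {dir : Int × Int}
    {v : List ((Int × Int) × (Int × Int))} {s : (Int × Int) × (Int × Int)}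
    (hs : s ∈ allStates m dir) (hv : s ∉ v) :
    pvMu m dir (PySem.Set.add v s) < pvMu m dir v := by
  unfold pvMu
  have hsub : List.Sublist ((allStates m dir).filter (fun x => ! (PySem.Set.add v s).contains x))
      ((allStates m dir).filter (fun x => ! v.contains x)) := by
    exact List.monotone_filter_right _ (pv_not_contains_mono (fun x hx => pv_mem_add hx))
  have hsin : s ∈ (allStates m dir).filter (fun x => ! v.contains x) := by
    simp [List.mem_filter, hs, hv]
  have hsout : s ∉ (allStates m dir).filter (fun x => ! (PySem.Set.add v s).contains x) := by
    simp [List.mem_filter, pv_add_append hv]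
  exact hsub.length_le.lt_of_ne (fun he => hsout ((hsub.eq_of_length he).symm ▸ hsin))


lemma pv_dirsOf_units (dir : Int × Int) :
    (1, 0) ∈ dirsOf dir ∧ (-1, 0) ∈ dirsOf dir ∧ (0, 1) ∈ dirsOf dir ∧ (0, -1) ∈ dirsOf dir := by
  simp [dirsOf]

-- one non-splitting step of A's loop: '.', an aligned splitter, a mirror (or the
-- excluded-char default) all move by changeDir d c, which equals d in the first two cases
lemma pv_goA_step_nonsplit (m : List String) (f : Nat) (i j : Int) (d : Int × Int)
    (v : List ((Int × Int) × (Int × Int)))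
    (hg : (inLimits m i j && ! v.contains ((i, j), d)) = true)
    (hs1 : ¬ (cellAt m i j = '|' ∧ (d = (0, 1) ∨ d = (0, -1))))
    (hs2 : ¬ (cellAt m i j = '-' ∧ (d = (1, 0) ∨ d = (-1, 0)))) :
    goA m (f + 1) i j d v =
      goA m f (i + (changeDir d (cellAt m i j)).1) (j + (changeDir d (cellAt m i j)).2)
        (changeDir d (cellAt m i j)) (PySem.Set.add v ((i, j), d)) := by
  by_cases hdot : cellAt m i j ≠ '.'
  · by_cases hsp : cellAt m i j = '|' ∨ cellAt m i j = '-'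
    · have hcd : changeDir d (cellAt m i j) = d := by
        rcases hsp with h | h <;> simp [changeDir, h]
      simp only [goA]
      rw [if_pos hg, if_pos hdot, if_pos hsp, if_neg hs1, if_neg hs2, hcd]
    · simp only [goA]
      rw [if_pos hg, if_pos hdot, if_neg hsp]
  · rw [not_not] at hdot
    have hcd : changeDir d (cellAt m i j) = d := by simp [changeDir, hdot]
    simp only [goA]
    rw [if_pos hg, if_neg (show ¬ cellAt m i j ≠ '.' from fun h => h hdot), hcd]

lemma pv_goA_step_splitV (m : List String) (f : Nat) (i j : Int) (d : Int × Int)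
    (v : List ((Int × Int) × (Int × Int)))
    (hg : (inLimits m i j && ! v.contains ((i, j), d)) = true)
    (hs : cellAt m i j = '|' ∧ (d = (0, 1) ∨ d = (0, -1))) :
    goA m (f + 1) i j d v =
      goA m f (i + 1) j (1, 0) (goA m f (i - 1) j (-1, 0) (PySem.Set.add v ((i, j), d))) := by
  simp only [goA]
  rw [if_pos hg, if_pos (show cellAt m i j ≠ '.' by simp [hs.1]), if_pos (Or.inl hs.1),
    if_pos hs]

lemma pv_goA_step_splitH (m : List String) (f : Nat) (i j : Int) (d : Int × Int)
    (v : List ((Int × Int) × (Int × Int)))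
    (hg : (inLimits m i j && ! v.contains ((i, j), d)) = true)
    (hs : cellAt m i j = '-' ∧ (d = (1, 0) ∨ d = (-1, 0))) :
    goA m (f + 1) i j d v =
      goA m f i (j - 1) (0, -1) (goA m f i (j + 1) (0, 1) (PySem.Set.add v ((i, j), d))) := by
  have hne : ¬ (cellAt m i j = '|' ∧ (d = (0, 1) ∨ d = (0, -1))) := by
    rcases hs.2 with h | h <;> simp [h]
  simp only [goA]
  rw [if_pos hg, if_pos (show cellAt m i j ≠ '.' by simp [hs.1]), if_pos (Or.inr hs.1),
    if_neg hne, if_pos hs]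

lemma pv_goA_guard_false (m : List String) (f : Nat) (i j : Int) (d : Int × Int)
    (v : List ((Int × Int) × (Int × Int)))
    (hg : ¬ (inLimits m i j && ! v.contains ((i, j), d)) = true) :
    goA m (f + 1) i j d v = v := by
  simp only [goA]
  rw [if_neg hg]

-- guard data: the state about to be added is a fresh member of allStates
lemma pv_guard_data {m : List String} {dir : Int × Int} {i j : Int} {d : Int × Int}
    {v : List ((Int × Int) × (Int × Int))}
    (hg : (inLimits m i j && ! v.contains ((i, j), d)) = true) (hd : d ∈ dirsOf dir) :
    ((i, j), d) ∈ allStates m dir ∧ ((i, j), d) ∉ v := by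
  rw [Bool.and_eq_true] at hg
  refine ⟨pv_mem_allStates hg.1 hd, ?_⟩
  have := hg.2
  simpa [List.contains_iff_mem] using this

-- A's walker returns the same set for any two sufficient fuels
lemma pv_goA_fuel (m : List String) (dir : Int × Int) : ∀ (n : Nat)
    (v : List ((Int × Int) × (Int × Int))) (i j : Int) (d : Int × Int) (f1 f2 : Nat),
    pvMu m dir v ≤ n → pvMu m dir v < f1 → pvMu m dir v < f2 → d ∈ dirsOf dir →
    goA m f1 i j d v = goA m f2 i j d v := by
  intro n
  induction n with
  | zero =>
    intro v i j d f1 f2 hn h1 h2 hd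
    obtain ⟨a, rfl⟩ : ∃ a, f1 = a + 1 := ⟨f1 - 1, by omega⟩
    obtain ⟨b, rfl⟩ : ∃ b, f2 = b + 1 := ⟨f2 - 1, by omega⟩
    by_cases hg : (inLimits m i j && ! v.contains ((i, j), d)) = true
    · obtain ⟨hmem, hnv⟩ := pv_guard_data hg hd
      have := pv_mu_lt_add (m := m) (dir := dir) hmem hnv
      omega
    · rw [pv_goA_guard_false m a i j d v hg, pv_goA_guard_false m b i j d v hg]
  | succ n ih =>
    intro v i j d f1 f2 hn h1 h2 hd
    obtain ⟨a, rfl⟩ : ∃ a, f1 = a + 1 := ⟨f1 - 1, by omega⟩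
    obtain ⟨b, rfl⟩ : ∃ b, f2 = b + 1 := ⟨f2 - 1, by omega⟩
    by_cases hg : (inLimits m i j && ! v.contains ((i, j), d)) = true
    · obtain ⟨hmem, hnv⟩ := pv_guard_data hg hd
      have hlt : pvMu m dir (PySem.Set.add v ((i, j), d)) < pvMu m dir v :=
        pv_mu_lt_add hmem hnv
      by_cases hs1 : cellAt m i j = '|' ∧ (d = (0, 1) ∨ d = (0, -1))
      · rw [pv_goA_step_splitV m a i j d v hg hs1, pv_goA_step_splitV m b i j d v hg hs1]
        have e1 : goA m a (i - 1) j (-1, 0) (PySem.Set.add v ((i, j), d)) =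
            goA m b (i - 1) j (-1, 0) (PySem.Set.add v ((i, j), d)) :=
          ih _ (i - 1) j (-1, 0) a b (by omega) (by omega) (by omega)
            (pv_dirsOf_units dir).2.1
        rw [e1]
        have hm1 : pvMu m dir (goA m b (i - 1) j (-1, 0) (PySem.Set.add v ((i, j), d))) ≤
            pvMu m dir (PySem.Set.add v ((i, j), d)) :=
          pv_mu_le_of_subset (fun x hx => pv_goA_mono m b (i - 1) j (-1, 0) _ x hx)
        exact ih _ (i + 1) j (1, 0) a b (by omega) (by omega) (by omega)
          (pv_dirsOf_units dir).1
      · by_cases hs2 : cellAt m i j = '-' ∧ (d = (1, 0) ∨ d = (-1, 0))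
        · rw [pv_goA_step_splitH m a i j d v hg hs2, pv_goA_step_splitH m b i j d v hg hs2]
          have e1 : goA m a i (j + 1) (0, 1) (PySem.Set.add v ((i, j), d)) =
              goA m b i (j + 1) (0, 1) (PySem.Set.add v ((i, j), d)) :=
            ih _ i (j + 1) (0, 1) a b (by omega) (by omega) (by omega)
              (pv_dirsOf_units dir).2.2.1
          rw [e1]
          have hm1 : pvMu m dir (goA m b i (j + 1) (0, 1) (PySem.Set.add v ((i, j), d))) ≤
              pvMu m dir (PySem.Set.add v ((i, j), d)) :=
            pv_mu_le_of_subset (fun x hx => pv_goA_mono m b i (j + 1) (0, 1) _ x hx)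
          exact ih _ i (j - 1) (0, -1) a b (by omega) (by omega) (by omega)
            (pv_dirsOf_units dir).2.2.2
        · rw [pv_goA_step_nonsplit m a i j d v hg hs1 hs2,
            pv_goA_step_nonsplit m b i j d v hg hs1 hs2]
          exact ih _ _ _ _ a b (by omega) (by omega) (by omega)
            (pv_changeDir_mem dir d (cellAt m i j) hd)
    · rw [pv_goA_guard_false m a i j d v hg, pv_goA_guard_false m b i j d v hg]

-- succsB under each of the three case hypotheses
lemma pv_succsB_splitV (m : List String) (i j : Int) (d : Int × Int)
    (hs : cellAt m i j = '|' ∧ (d = (0, 1) ∨ d = (0, -1))) :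
    succsB m ((i, j), d) = [((i - 1, j), (-1, 0)), ((i + 1, j), (1, 0))] := by
  simp only [succsB]
  rw [if_pos hs]

lemma pv_succsB_splitH (m : List String) (i j : Int) (d : Int × Int)
    (hs : cellAt m i j = '-' ∧ (d = (1, 0) ∨ d = (-1, 0))) :
    succsB m ((i, j), d) = [((i, j + 1), (0, 1)), ((i, j - 1), (0, -1))] := by
  have hne : ¬ (cellAt m i j = '|' ∧ (d = (0, 1) ∨ d = (0, -1))) := by
    rcases hs.2 with h | h <;> simp [h]
  simp only [succsB]
  rw [if_neg hne, if_pos hs]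

lemma pv_succsB_nonsplit (m : List String) (i j : Int) (d : Int × Int)
    (hs1 : ¬ (cellAt m i j = '|' ∧ (d = (0, 1) ∨ d = (0, -1))))
    (hs2 : ¬ (cellAt m i j = '-' ∧ (d = (1, 0) ∨ d = (-1, 0)))) :
    succsB m ((i, j), d) =
      [((i + (changeDir d (cellAt m i j)).1, j + (changeDir d (cellAt m i j)).2),
        changeDir d (cellAt m i j))] := by
  have hnd : (if cellAt m i j = '.' ∨ cellAt m i j = '|' ∨ cellAt m i j = '-' then d
      else changeDir d (cellAt m i j)) = changeDir d (cellAt m i j) := by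
    split_ifs with h
    · rcases h with h | h | h <;> simp [changeDir, h]
    · rfl
  simp only [succsB]
  rw [if_neg hs1, if_neg hs2, hnd]

-- goB step shapes (pop + push, written with the explicit successor lists)
lemma pv_goB_step_splitV (m : List String) (f : Nat) (i j : Int) (d : Int × Int)
    (rest v : List ((Int × Int) × (Int × Int)))
    (hg : (inLimits m i j && ! v.contains ((i, j), d)) = true)
    (hs : cellAt m i j = '|' ∧ (d = (0, 1) ∨ d = (0, -1))) :
    goB m (f + 1) (((i, j), d) :: rest) v =
      goB m f (((i - 1, j), (-1, 0)) :: ((i + 1, j), (1, 0)) :: rest)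
        (PySem.Set.add v ((i, j), d)) := by
  simp only [goB]
  rw [if_pos hg, pv_succsB_splitV m i j d hs]
  rfl

lemma pv_goB_step_splitH (m : List String) (f : Nat) (i j : Int) (d : Int × Int)
    (rest v : List ((Int × Int) × (Int × Int)))
    (hg : (inLimits m i j && ! v.contains ((i, j), d)) = true)
    (hs : cellAt m i j = '-' ∧ (d = (1, 0) ∨ d = (-1, 0))) :
    goB m (f + 1) (((i, j), d) :: rest) v =
      goB m f (((i, j + 1), (0, 1)) :: ((i, j - 1), (0, -1)) :: rest)
        (PySem.Set.add v ((i, j), d)) := by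
  simp only [goB]
  rw [if_pos hg, pv_succsB_splitH m i j d hs]
  rfl

lemma pv_goB_step_nonsplit (m : List String) (f : Nat) (i j : Int) (d : Int × Int)
    (rest v : List ((Int × Int) × (Int × Int)))
    (hg : (inLimits m i j && ! v.contains ((i, j), d)) = true)
    (hs1 : ¬ (cellAt m i j = '|' ∧ (d = (0, 1) ∨ d = (0, -1))))
    (hs2 : ¬ (cellAt m i j = '-' ∧ (d = (1, 0) ∨ d = (-1, 0)))) :
    goB m (f + 1) (((i, j), d) :: rest) v =
      goB m f (((i + (changeDir d (cellAt m i j)).1, j + (changeDir d (cellAt m i j)).2),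
        changeDir d (cellAt m i j)) :: rest) (PySem.Set.add v ((i, j), d)) := by
  simp only [goB]
  rw [if_pos hg, pv_succsB_nonsplit m i j d hs1 hs2]
  rfl

lemma pv_goB_guard_false (m : List String) (f : Nat) (i j : Int) (d : Int × Int)
    (rest v : List ((Int × Int) × (Int × Int)))
    (hg : ¬ (inLimits m i j && ! v.contains ((i, j), d)) = true) :
    goB m (f + 1) (((i, j), d) :: rest) v = goB m f rest v := by
  simp only [goB]
  rw [if_neg hg]

-- the simulation: B's worklist run equals running A's walker on the stack entries in order
lemma pv_bridge (m : List String) (dir : Int × Int) : ∀ (f : Nat)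
    (stack v : List ((Int × Int) × (Int × Int))),
    (∀ b ∈ stack, b.2 ∈ dirsOf dir) → 3 * pvMu m dir v + stack.length < f →
    goB m f stack v = AFold m dir stack v := by
  intro f
  induction f with
  | zero => intro stack v _ hf; omega
  | succ f ih =>
    intro stack v hds hf
    match stack, hds, hf with
    | [], _, _ => simp [goB, AFold]
    | ((i, j), d) :: rest, hds, hf =>
      have hd : d ∈ dirsOf dir := hds _ (List.mem_cons_self ..)
      have hrest : ∀ b ∈ rest, b.2 ∈ dirsOf dir := fun b hb => hds b (List.mem_cons_of_mem _ hb)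
      have hmuL : pvMu m dir v ≤ (allStates m dir).length := pv_mu_le_len m dir v
      by_cases hg : (inLimits m i j && ! v.contains ((i, j), d)) = true
      · obtain ⟨hmem, hnv⟩ := pv_guard_data hg hd
        have hlt : pvMu m dir (PySem.Set.add v ((i, j), d)) < pvMu m dir v :=
          pv_mu_lt_add hmem hnv
        have hmu'L : pvMu m dir (PySem.Set.add v ((i, j), d)) ≤ (allStates m dir).length :=
          pv_mu_le_len m dir _
        by_cases hs1 : cellAt m i j = '|' ∧ (d = (0, 1) ∨ d = (0, -1))
        · rw [pv_goB_step_splitV m f i j d rest v hg hs1]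
          rw [ih (((i - 1, j), (-1, 0)) :: ((i + 1, j), (1, 0)) :: rest) _
            (by
              intro b hb
              simp only [List.mem_cons] at hb
              rcases hb with rfl | rfl | hb
              · exact (pv_dirsOf_units dir).2.1
              · exact (pv_dirsOf_units dir).1
              · exact hrest _ hb)
            (by simp only [List.length_cons] at hf ⊢; omega)]
          show AFold m dir _ _ = AFold m dir (((i, j), d) :: rest) v
          simp only [AFold]
          rw [pv_goA_step_splitV m (allStates m dir).length i j d v hg hs1]
          rw [pv_goA_fuel m dir (pvMu m dir (PySem.Set.add v ((i, j), d)))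
            (PySem.Set.add v ((i, j), d)) (i - 1) j (-1, 0)
            (allStates m dir).length ((allStates m dir).length + 1) le_rfl
            (by omega) (by omega) (pv_dirsOf_units dir).2.1]
          have hm1 : pvMu m dir
              (goA m ((allStates m dir).length + 1) (i - 1) j (-1, 0)
                (PySem.Set.add v ((i, j), d))) ≤
              pvMu m dir (PySem.Set.add v ((i, j), d)) :=
            pv_mu_le_of_subset
              (fun x hx => pv_goA_mono m ((allStates m dir).length + 1) (i - 1) j (-1, 0) _ x hx)
          rw [pv_goA_fuel m dir
            (pvMu m dir (goA m ((allStates m dir).length + 1) (i - 1) j (-1, 0)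
              (PySem.Set.add v ((i, j), d))))
            (goA m ((allStates m dir).length + 1) (i - 1) j (-1, 0)
              (PySem.Set.add v ((i, j), d))) (i + 1) j (1, 0)
            (allStates m dir).length ((allStates m dir).length + 1) le_rfl
            (by omega) (by omega) (pv_dirsOf_units dir).1]
        · by_cases hs2 : cellAt m i j = '-' ∧ (d = (1, 0) ∨ d = (-1, 0))
          · rw [pv_goB_step_splitH m f i j d rest v hg hs2]
            rw [ih (((i, j + 1), (0, 1)) :: ((i, j - 1), (0, -1)) :: rest) _
              (by
                intro b hb
                simp only [List.mem_cons] at hb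
                rcases hb with rfl | rfl | hb
                · exact (pv_dirsOf_units dir).2.2.1
                · exact (pv_dirsOf_units dir).2.2.2
                · exact hrest _ hb)
              (by simp only [List.length_cons] at hf ⊢; omega)]
            show AFold m dir _ _ = AFold m dir (((i, j), d) :: rest) v
            simp only [AFold]
            rw [pv_goA_step_splitH m (allStates m dir).length i j d v hg hs2]
            rw [pv_goA_fuel m dir (pvMu m dir (PySem.Set.add v ((i, j), d)))
              (PySem.Set.add v ((i, j), d)) i (j + 1) (0, 1)
              (allStates m dir).length ((allStates m dir).length + 1) le_rfl
              (by omega) (by omega) (pv_dirsOf_units dir).2.2.1]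
            have hm1 : pvMu m dir
                (goA m ((allStates m dir).length + 1) i (j + 1) (0, 1)
                  (PySem.Set.add v ((i, j), d))) ≤
                pvMu m dir (PySem.Set.add v ((i, j), d)) :=
              pv_mu_le_of_subset
                (fun x hx => pv_goA_mono m ((allStates m dir).length + 1) i (j + 1) (0, 1) _ x hx)
            rw [pv_goA_fuel m dir
              (pvMu m dir (goA m ((allStates m dir).length + 1) i (j + 1) (0, 1)
                (PySem.Set.add v ((i, j), d))))
              (goA m ((allStates m dir).length + 1) i (j + 1) (0, 1)
                (PySem.Set.add v ((i, j), d))) i (j - 1) (0, -1)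
              (allStates m dir).length ((allStates m dir).length + 1) le_rfl
              (by omega) (by omega) (pv_dirsOf_units dir).2.2.2]
          · rw [pv_goB_step_nonsplit m f i j d rest v hg hs1 hs2]
            rw [ih _ _
              (by
                intro b hb
                simp only [List.mem_cons] at hb
                rcases hb with rfl | hb
                · exact pv_changeDir_mem dir d (cellAt m i j) hd
                · exact hrest _ hb)
              (by simp only [List.length_cons] at hf ⊢; omega)]
            show AFold m dir _ _ = AFold m dir (((i, j), d) :: rest) v
            simp only [AFold]
            rw [pv_goA_step_nonsplit m (allStates m dir).length i j d v hg hs1 hs2]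
            rw [pv_goA_fuel m dir (pvMu m dir (PySem.Set.add v ((i, j), d)))
              (PySem.Set.add v ((i, j), d)) _ _ _
              (allStates m dir).length ((allStates m dir).length + 1) le_rfl
              (by omega) (by omega) (pv_changeDir_mem dir d (cellAt m i j) hd)]
      · rw [pv_goB_guard_false m f i j d rest v hg]
        rw [ih rest v hrest (by simp only [List.length_cons] at hf; omega)]
        show AFold m dir rest v = AFold m dir (((i, j), d) :: rest) v
        simp only [AFold]
        rw [pv_goA_guard_false m (allStates m dir).length i j d v hg]

-- ===== VERDICT =====
theorem runBeam_spec : Claim_equal_runBeam := by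
  intro m start dir visited _ _
  unfold Spec_runBeam runBeam runBeam_alt
  rw [pv_bridge m dir (3 * (allStates m dir).length + 2) _ visited
    (by
      intro b hb
      simp only [List.mem_cons, List.not_mem_nil, or_false] at hb
      subst hb
      simp [dirsOf])
    (by
      have := pv_mu_le_len m dir visited
      simp only [List.length_cons, List.length_nil]
      omega)]
  simp only [AFold]
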